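-- pv_equiv track=rewrite | github.com/pypi-data/pypi-mirror-187 | packages/multiwidth/multiwidth-1.0.0-py3-none-any.whl/multiwidth/multiwidth.py | get_letter_locations
-- ===== SOURCE A (Python) =====
-- from typing import List, Dict, Union
--
-- def get_letter_locations(contents: str, padding: str = " ") -> List[int]:
--     """Gets the locations of starting letters of words in a string
--
--     Args:
--         contents (str): String to get starting letter locations from
--         padding (str, optional): Padding between columns. Defaults to " ".
--
--     Returns:
--         List[int]: Indices in the string of starting letters of words
--     """
--
--     lines = contents.split("\n")
--
--     # Remove empty lines
--     lines = [line for line in lines if len(line) > 0]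
--
--     max_length = 0
--     letter_locations = []
--     # Get all the locations of the first letter of a word
--     for line in lines:
--         line_letter_locations = []
--         chars = list(line)
--         first_flag = True
--         for idx, char in enumerate(chars):
--             # Is it checking for the beginning of a work and not a space
--             if first_flag and char != padding:
--                 line_letter_locations.append(idx)
--                 first_flag = False
--                 continue
--             # If it's a space then we want to look for the beginning of a word
--             if char == padding:
--                 first_flag = True
--
--         letter_locations.append(line_letter_locations)
--         if len(line) > max_length:
--             max_length = len(line)
--     # Now that we have the letter locations we want to know which ones they all have in
--     # common. Start by loading in the first line
--     global_letter_locations = letter_locations[0]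
--
--     # We then loop through all the lines and only keep those that are in common
--     for letter_location in letter_locations[1:]:
--         global_letter_locations = set(global_letter_locations).intersection(
--             letter_location
--         )
--
--     global_letter_locations = sorted(list(set(global_letter_locations)))
--     global_letter_locations.append(max_length + 1)
--
--     return global_letter_locations
-- ===== SOURCE B (Python) =====
-- def get_letter_locations(contents: str, padding: str = " "):
--     """Word-start columns common to every non-empty line, plus max line length + 1.
--
--     Single pass building one counter of start columns instead of per-line
--     lists intersected as sets."""
--     lines = [line for line in contents.split("\n") if line]
--     counts = {}
--     for line in lines:
--         for i, c in enumerate(line):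
--             if c != padding and (i == 0 or line[i - 1] == padding):
--                 counts[i] = counts.get(i, 0) + 1
--     n = len(lines)
--     result = sorted(i for i, v in counts.items() if v == n)
--     result.append(max(map(len, lines)) + 1)
--     return result
-- ===== Notes on version B (the rewrite author's own statement) =====
-- stated objective: alternative
-- what changed: Replaces A's per-line stateful first_flag scan plus iterated set() intersections with a single pass that detects word starts by an adjacency predicate (i == 0 or line[i-1] == padding) and counts per column in how many lines a word starts, keeping the columns whose count equals the number of non-empty lines.
import Mathlib
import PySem

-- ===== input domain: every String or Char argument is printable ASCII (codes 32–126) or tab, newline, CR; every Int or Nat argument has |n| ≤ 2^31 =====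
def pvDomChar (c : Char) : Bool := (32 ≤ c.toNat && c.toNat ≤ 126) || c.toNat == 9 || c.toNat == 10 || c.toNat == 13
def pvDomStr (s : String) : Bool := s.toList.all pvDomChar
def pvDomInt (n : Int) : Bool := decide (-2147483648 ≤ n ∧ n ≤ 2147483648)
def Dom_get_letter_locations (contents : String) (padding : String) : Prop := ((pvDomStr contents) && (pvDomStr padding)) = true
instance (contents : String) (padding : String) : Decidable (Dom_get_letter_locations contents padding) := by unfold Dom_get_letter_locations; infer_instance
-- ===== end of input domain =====

-- B replaces A's per-line first_flag scans + iterated set intersection by one counter of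
-- word-start columns keyed by an adjacency predicate (objective: alternative single-pass decomposition).


-- ===== PORT A =====
-- inner loop body: 'if first_flag and char != padding: append; flag=False; continue / if char == padding: flag=True'
def pvStepA (padding : List Char) (st : Bool × List Int) (p : Int × Char) : Bool × List Int :=
  if st.1 = true ∧ [p.2] ≠ padding then (false, st.2 ++ [p.1])
  else if [p.2] = padding then (true, st.2)
  else st

def pvLineStartsA (padding : List Char) (line : List Char) : List Int :=
  ((PySem.List.enumerate line 0).foldl (pvStepA padding) (true, [])).2

def get_letter_locations (contents : String) (padding : String) : List Int :=
  let lines := (PySem.Chars.splitOn contents.toList ['\n']).filter (fun l => 0 < l.length)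
  let st := lines.foldl (fun st line =>
      (st.1 ++ [pvLineStartsA padding.toList line],
       if (line.length : Int) > st.2 then (line.length : Int) else st.2)) ([], 0)
  -- letter_locations[0] raises IndexError when there is no non-empty line: excluded by Pre_
  let g0 := (PySem.List.pyGet? st.1 0).getD []
  let g := (PySem.List.slice st.1 (some 1) none).foldl
      (fun g loc => PySem.Set.inter (PySem.Set.ofList g) loc) g0
  PySem.List.sorted (PySem.Set.ofList g) (fun x => x) false ++ [st.2 + 1]

-- ===== PORT B =====
-- 'c != padding and (i == 0 or line[i-1] == padding)'
def pvIsStartB (padding : List Char) (line : List Char) (i : Int) (c : Char) : Bool :=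
  decide (([c] ≠ padding) ∧
    (i = 0 ∨ (PySem.List.pyGet? line (i - 1)).map (fun ch => [ch]) = some padding))

def get_letter_locations_alt (contents : String) (padding : String) : List Int :=
  let lines := (PySem.Chars.splitOn contents.toList ['\n']).filter (fun l => l ≠ [])
  let counts := lines.foldl (fun d line =>
      (PySem.List.enumerate line 0).foldl
        (fun d p => if pvIsStartB padding.toList line p.1 p.2
                    then d.insert p.1 (d.getD p.1 0 + 1) else d) d)
    PySem.Dict.empty
  let n : Int := lines.length
  let res := PySem.List.sorted ((counts.items.filter (fun p => p.2 = n)).map (·.1)) (fun x => x) false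
  -- max() raises ValueError when there is no non-empty line: excluded by Pre_
  res ++ [(PySem.List.max? (lines.map (fun l => (l.length : Int))) (fun x => x)).getD 0 + 1]

-- ===== PRECONDITION & SPEC =====
-- Pre_ excludes exactly the inputs with no non-empty line (contents empty or newlines only):
-- there A raises IndexError on letter_locations[0] (and B raises ValueError on max()).
def Pre_get_letter_locations (contents : String) (padding : String) : Prop :=
  (PySem.Chars.splitOn contents.toList ['\n']).filter (fun l => l ≠ []) ≠ []
instance (contents : String) (padding : String) : Decidable (Pre_get_letter_locations contents padding) := by unfold Pre_get_letter_locations; infer_instance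

def pvWitness_get_letter_locations : String × String := ("ab cd e\nab  d e", " ")

def Spec_get_letter_locations (contents : String) (padding : String) (out : List Int) : Prop := out = get_letter_locations_alt contents padding
instance (contents : String) (padding : String) (out : List Int) : Decidable (Spec_get_letter_locations contents padding out) := by unfold Spec_get_letter_locations; infer_instance

-- ===== CLAIM (what is proved, stated in full; the proofs are below) =====
def Claim_equal_get_letter_locations : Prop := ∀ (contents : String) (padding : String), Dom_get_letter_locations contents padding → Pre_get_letter_locations contents padding → Spec_get_letter_locations contents padding (get_letter_locations contents padding)

-- ===== LEMMAS AND PROOFS =====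

-- the common spec of a line's word-start columns:
-- sel f s cs = starts in cs at offset s, f = "previous char was padding (or start of line)"
def pvSel (padding : List Char) : Bool → Int → List Char → List Int
  | _, _, [] => []
  | f, s, c :: cs =>
      (if f = true ∧ [c] ≠ padding then [s] else []) ++
        pvSel padding (decide ([c] = padding)) (s + 1) cs

lemma pvSel_lb (padding : List Char) :
    ∀ (cs : List Char) (f : Bool) (s x : Int), x ∈ pvSel padding f s cs → s ≤ x := by
  intro cs
  induction cs with
  | nil => intro f s x h; simp [pvSel] at h
  | cons c cs ih =>
      intro f s x h
      simp only [pvSel, List.mem_append] at h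
      rcases h with h | h
      · split at h <;> simp_all
      · have := ih _ _ _ h; omega

lemma pvSel_pairwise (padding : List Char) :
    ∀ (cs : List Char) (f : Bool) (s : Int), (pvSel padding f s cs).Pairwise (· < ·) := by
  intro cs
  induction cs with
  | nil => intro f s; simp [pvSel]
  | cons c cs ih =>
      intro f s
      simp only [pvSel]
      split
      · simp only [List.singleton_append, List.pairwise_cons]
        exact ⟨fun x hx => by have := pvSel_lb padding cs _ _ _ hx; omega, ih _ _⟩
      · simpa using ih _ _

lemma pvSel_nodup (padding : List Char) (cs : List Char) (f : Bool) (s : Int) :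
    (pvSel padding f s cs).Nodup :=
  (pvSel_pairwise padding cs f s).imp (fun h => ne_of_lt h)

-- A's flag loop computes pvSel
lemma pvFoldA (padding : List Char) :
    ∀ (cs : List Char) (f : Bool) (acc : List Int) (s : Int),
      ((PySem.List.enumerate cs s).foldl (pvStepA padding) (f, acc)).2
        = acc ++ pvSel padding f s cs := by
  intro cs
  induction cs with
  | nil => intro f acc s; simp [pvSel, PySem.List.enumerate_nil]
  | cons c cs ih =>
      intro f acc s
      rw [PySem.List.enumerate_cons, List.foldl_cons]
      by_cases hc : [c] = padding
      · have hf : ¬ ((f, acc).1 = true ∧ [(s, c).2] ≠ padding) := by simp [hc]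
        simp only [pvStepA, if_neg hf, if_pos (show [(s, c).2] = padding from hc)]
        rw [ih]
        simp [pvSel, hc]
      · cases f with
        | true =>
            have hf : (((true : Bool), acc).1 = true ∧ [((s : Int), c).2] ≠ padding) := ⟨rfl, hc⟩
            simp only [pvStepA]
            rw [ih]
            simp [pvSel, hc]
        | false =>
            have hf : ¬ (((false : Bool), acc).1 = true ∧ [((s : Int), c).2] ≠ padding) := by simp
            simp only [pvStepA, if_neg hf, if_neg (show ¬ [((s : Int), c).2] = padding from hc)]
            rw [ih]
            simp [pvSel, hc]

lemma pvLineStartsA_eq (padding : List Char) (line : List Char) :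
    pvLineStartsA padding line = pvSel padding true 0 line := by
  unfold pvLineStartsA
  rw [pvFoldA]
  simp

-- B's predicate-filter computes pvSel
def pvFlagOf (padding : List Char) (pre : List Char) : Bool :=
  match pre.getLast? with
  | none => true
  | some c => decide ([c] = padding)

lemma pvFilterB (padding : List Char) :
    ∀ (cs pre : List Char),
      (((PySem.List.enumerate cs (pre.length : Int)).filter
          (fun p => pvIsStartB padding (pre ++ cs) p.1 p.2)).map (·.1))
        = pvSel padding (pvFlagOf padding pre) (pre.length : Int) cs := by
  intro cs
  induction cs with
  | nil => intro pre; simp [pvSel, PySem.List.enumerate_nil]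
  | cons c cs ih =>
      intro pre
      have hpred : pvIsStartB padding (pre ++ c :: cs) ((pre.length : Int)) c
          = (pvFlagOf padding pre && decide ([c] ≠ padding)) := by
        rcases List.eq_nil_or_concat pre with rfl | ⟨q, a, rfl⟩
        · simp only [List.nil_append, List.length_nil, Nat.cast_zero, pvIsStartB, pvFlagOf,
            List.getLast?_nil, Bool.true_and]
          by_cases h1 : [c] = padding <;> simp [h1]
        · simp only [List.concat_eq_append]
          have hlen : (((q ++ [a]).length : Nat) : Int) = (q.length : Int) + 1 := by simp
          have hidx : ((q.length : Int) + 1) - 1 = ((q.length : Nat) : Int) := by omega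
          have hget : PySem.List.pyGet? ((q ++ [a]) ++ c :: cs) (((q.length : Nat)) : Int)
              = some a := by
            rw [PySem.List.pyGet?_natCast]
            rw [List.getElem?_append_left (by simp)]
            simp
          have hflag : pvFlagOf padding (q ++ [a]) = decide ([a] = padding) := by
            simp [pvFlagOf]
          rw [hflag]
          simp only [pvIsStartB, hlen, hidx, hget, Option.map_some]
          have hne : ¬ ((q.length : Int) + 1 = 0) := by omega
          by_cases h1 : [c] = padding <;> by_cases h2 : [a] = padding <;>
            simp [h1, h2, hne]
      have hrec := ih (pre ++ [c])
      have hline : (pre ++ [c]) ++ cs = pre ++ c :: cs := by simp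
      have hflag : pvFlagOf padding (pre ++ [c]) = decide ([c] = padding) := by
        simp [pvFlagOf]
      have hlen2 : (((pre ++ [c]).length : Nat) : Int) = (pre.length : Int) + 1 := by simp
      rw [hline, hflag, hlen2] at hrec
      rw [PySem.List.enumerate_cons, List.filter_cons]
      simp only [hpred]
      rcases hF : pvFlagOf padding pre with _ | _ <;>
        rcases hC : decide ([c] = padding) with _ | _ <;>
          simp_all [pvSel]

lemma pvStartsB_eq (padding : List Char) (line : List Char) :
    (((PySem.List.enumerate line 0).filter
        (fun p => pvIsStartB padding line p.1 p.2)).map (·.1))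
      = pvSel padding true 0 line := by
  have := pvFilterB padding line []
  simpa [pvFlagOf] using this

-- guarded fold = fold over the filtered, mapped list (generic loop shape)
lemma pvFoldGuard {β κ σ : Type} (pred : β → Bool) (f : β → κ) (step : σ → κ → σ) :
    ∀ (l : List β) (init : σ),
      l.foldl (fun d p => if pred p then step d (f p) else d) init
        = ((l.filter pred).map f).foldl step init := by
  intro l
  induction l with
  | nil => intro init; simp
  | cons x l ih =>
      intro init
      by_cases h : pred x <;> simp [h, ih]

-- membership in A's iterated intersection
lemma pvMemInterFold (ls : List (List Int)) :
    ∀ (g0 : List Int) (x : Int),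
      x ∈ ls.foldl (fun g loc => PySem.Set.inter (PySem.Set.ofList g) loc) g0
        ↔ x ∈ g0 ∧ ∀ l ∈ ls, x ∈ l := by
  induction ls with
  | nil => intro g0 x; simp
  | cons l ls ih =>
      intro g0 x
      simp only [List.foldl_cons, ih, PySem.Set.mem_inter, PySem.Set.mem_ofList,
        List.mem_cons]
      constructor
      · rintro ⟨⟨h0, hl⟩, hrest⟩
        exact ⟨h0, fun m hm => by rcases hm with rfl | hm; exact hl; exact hrest m hm⟩
      · rintro ⟨h0, hall⟩
        exact ⟨⟨h0, hall l (Or.inl rfl)⟩, fun m hm => hall m (Or.inr hm)⟩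

-- count in a flatMap of nodup lists
lemma pvCountFlatLe (x : Int) :
    ∀ (ls : List (List Int)), (∀ l ∈ ls, l.Nodup) →
      (ls.flatMap id).count x ≤ ls.length := by
  intro ls
  induction ls with
  | nil => simp
  | cons l ls ih =>
      intro h
      simp only [List.flatMap_cons, List.count_append, List.length_cons, id]
      have h1 : l.count x ≤ 1 := List.nodup_iff_count_le_one.mp (h l (by simp)) x
      have h2 := ih (fun m hm => h m (by simp [hm]))
      omega

lemma pvCountFlatIff (x : Int) :
    ∀ (ls : List (List Int)), (∀ l ∈ ls, l.Nodup) →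
      ((ls.flatMap id).count x = ls.length ↔ ∀ l ∈ ls, x ∈ l) := by
  intro ls
  induction ls with
  | nil => simp
  | cons l ls ih =>
      intro h
      simp only [List.flatMap_cons, List.count_append, List.length_cons, id]
      have h1 : l.count x ≤ 1 := List.nodup_iff_count_le_one.mp (h l (by simp)) x
      have h2 := pvCountFlatLe x ls (fun m hm => h m (by simp [hm]))
      have h3 := ih (fun m hm => h m (by simp [hm]))
      have h4 : 0 < l.count x ↔ x ∈ l := List.count_pos_iff
      constructor
      · intro he
        have hx : x ∈ l := h4.mp (by omega)
        have hr := h3.mp (by omega)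
        intro m hm
        rcases List.mem_cons.mp hm with rfl | hm
        · exact hx
        · exact hr m hm
      · intro hall
        have hx : 0 < l.count x := h4.mpr (hall l (by simp))
        have hr := h3.mpr (fun m hm => hall m (by simp [hm]))
        omega

-- running max over nonneg values
lemma pvMaxFold (vals : List Int) (hnn : ∀ v ∈ vals, 0 ≤ v) (hne : vals ≠ []) :
    vals.foldl (fun m v => if v > m then v else m) 0
      = (PySem.List.max? vals (fun x => x)).getD 0 := by
  have hstep : ∀ (t : List Int) (m : Int),
      t.foldl (fun m v => if v > m then v else m) m = t.foldl max m := by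
    intro t
    induction t with
    | nil => intro m; rfl
    | cons v t ih =>
        intro m
        simp only [List.foldl_cons, ih]
        congr 1
        rw [max_def]
        split <;> split <;> omega
  obtain ⟨v, t, rfl⟩ : ∃ v t, vals = v :: t := by
    cases vals with
    | nil => exact absurd rfl hne
    | cons v t => exact ⟨v, t, rfl⟩
  rw [PySem.List.max?_id_cons, Option.getD_some, List.foldl_cons, hstep]
  have h0 : max 0 v = v := max_eq_right (hnn v (by simp))
  rw [show (if v > 0 then v else 0) = max 0 v by rw [max_def]; split <;> split <;> omega, h0]

-- B's guarded inner loop is the counting loop over the line's start list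
lemma pvInnerFold (pad : List Char) (line : List Char) (d : PySem.Dict Int Int) :
    (PySem.List.enumerate line 0).foldl
      (fun d p => if pvIsStartB pad line p.1 p.2 then d.insert p.1 (d.getD p.1 0 + 1) else d) d
    = (pvSel pad true 0 line).foldl (fun d x => d.insert x (d.getD x 0 + 1)) d := by
  have h1 := pvFoldGuard (fun p => pvIsStartB pad line p.1 p.2) (fun p : Int × Char => p.1)
    (fun d x => d.insert x (d.getD x 0 + 1)) (PySem.List.enumerate line 0) d
  rw [pvStartsB_eq pad line] at h1
  exact h1

-- the two sorted common-column lists agree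
lemma pvSortedEq (pad : List Char) (l0 : List Char) (rest : List (List Char)) :
    PySem.List.sorted (PySem.Set.ofList ((rest.map (pvSel pad true 0)).foldl
        (fun g loc => PySem.Set.inter (PySem.Set.ofList g) loc) (pvSel pad true 0 l0)))
      (fun x => x) false
    = PySem.List.sorted
        (((PySem.Dict.counter ((l0 :: rest).flatMap (pvSel pad true 0))).items.filter
            (fun p => p.2 = (((l0 :: rest).length : Nat) : Int))).map (·.1))
        (fun x => x) false := by
  have hKB : (((PySem.Dict.counter ((l0 :: rest).flatMap (pvSel pad true 0))).items.filter
          (fun p => p.2 = (((l0 :: rest).length : Nat) : Int))).map (·.1))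
      = (PySem.Set.ofList ((l0 :: rest).flatMap (pvSel pad true 0))).filter
          (fun k => decide ((((l0 :: rest).flatMap (pvSel pad true 0)).count k : Int)
            = (((l0 :: rest).length : Nat) : Int))) := by
    rw [PySem.Dict.items_counter, List.filter_map, List.map_map]
    simp [Function.comp_def]
  apply PySem.List.sorted_eq_sorted_of_perm _ _ _ (fun {a b} h => h)
  rw [hKB]
  rw [List.perm_ext_iff_of_nodup (PySem.Set.nodup_ofList _)
    ((PySem.Set.nodup_ofList _).filter _)]
  intro x
  have hnd : ∀ l ∈ (l0 :: rest).map (pvSel pad true 0), l.Nodup := by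
    intro l hl
    rcases List.mem_map.mp hl with ⟨m, _, rfl⟩
    exact pvSel_nodup pad m true 0
  have hflat : ((l0 :: rest).map (pvSel pad true 0)).flatMap id
      = (l0 :: rest).flatMap (pvSel pad true 0) := by
    rw [List.flatMap_map]
    rfl
  have hcnt := pvCountFlatIff x ((l0 :: rest).map (pvSel pad true 0)) hnd
  rw [hflat, List.length_map] at hcnt
  simp only [PySem.Set.mem_ofList, List.mem_filter, PySem.Set.mem_ofList,
    pvMemInterFold, decide_eq_true_eq, Nat.cast_inj, hcnt]
  constructor
  · rintro ⟨h0, hrest⟩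
    refine ⟨List.mem_flatMap.mpr ⟨l0, by simp, h0⟩, ?_⟩
    intro l hl
    rcases List.mem_map.mp hl with ⟨m, hm, rfl⟩
    rcases List.mem_cons.mp hm with rfl | hm
    · exact h0
    · exact hrest _ (List.mem_map.mpr ⟨m, hm, rfl⟩)
  · rintro ⟨_, hall⟩
    refine ⟨hall _ (by simp), ?_⟩
    intro l hl
    rcases List.mem_map.mp hl with ⟨m, hm, rfl⟩
    exact hall _ (List.mem_map.mpr ⟨m, by simp [hm], rfl⟩)

-- ===== VERDICT (by name: the statement is the Claim_ definition above) =====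
theorem get_letter_locations_spec : Claim_equal_get_letter_locations := by
  intro contents padding _ hpre
  unfold Spec_get_letter_locations get_letter_locations get_letter_locations_alt
  have hfeq : (PySem.Chars.splitOn contents.toList ['\n']).filter (fun l => 0 < l.length)
      = (PySem.Chars.splitOn contents.toList ['\n']).filter (fun l => l ≠ []) := by
    apply List.filter_congr
    intro l _
    cases l <;> simp
  rw [hfeq]
  obtain ⟨l0, rest, hls⟩ : ∃ a t,
      (PySem.Chars.splitOn contents.toList ['\n']).filter (fun l => l ≠ []) = a :: t := by
    rcases h : (PySem.Chars.splitOn contents.toList ['\n']).filter (fun l => l ≠ []) with _ | ⟨a, t⟩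
    · exact absurd h hpre
    · exact ⟨a, t, rfl⟩
  rw [hls]
  simp only []
  -- split the pair-building fold into its two components
  rw [PySem.List.foldl_prod_mk (fun acc line => acc ++ [pvLineStartsA padding.toList line])
    (fun m line => if (line.length : Int) > m then (line.length : Int) else m)]
  dsimp only
  -- A side: per-line start lists, head and tail of the list of lists
  simp only [pvLineStartsA_eq, PySem.List.foldl_append_singleton_eq_map, List.nil_append,
    List.map_cons]
  have hget : PySem.List.pyGet?
      (pvSel padding.toList true 0 l0 :: rest.map (pvSel padding.toList true 0)) (0 : Int)
      = some (pvSel padding.toList true 0 l0) := by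
    simp [PySem.List.pyGet?, PySem.List.pyIdx?]
  have hslice : PySem.List.slice
      (pvSel padding.toList true 0 l0 :: rest.map (pvSel padding.toList true 0)) (some 1) none
      = rest.map (pvSel padding.toList true 0) := by
    have := PySem.List.slice_from
      (pvSel padding.toList true 0 l0 :: rest.map (pvSel padding.toList true 0)) (a := 1)
      (by omega)
    simp at this
    exact this
  rw [hget, hslice, Option.getD_some]
  -- A side: running max = max?
  rw [show (l0 :: rest).foldl (fun m line => if (line.length : Int) > m then (line.length : Int) else m) 0
        = ((l0 :: rest).map (fun l => (l.length : Int))).foldl (fun m v => if v > m then v else m) 0 from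
      (List.foldl_map (f := fun l : List Char => (l.length : Int))
        (g := fun (m v : Int) => if v > m then v else m)).symm]
  rw [pvMaxFold _ (by rintro v hv; rcases List.mem_map.mp hv with ⟨m, _, rfl⟩; positivity) (by simp)]
  -- B side: guarded dict loop = counter of the flattened start lists
  simp only [pvInnerFold]
  rw [← List.foldl_flatMap, PySem.Dict.foldl_insert_getD_add_one_eq_counter]
  rw [pvSortedEq padding.toList l0 rest]
  simp only [List.map_cons]
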